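-- pv_equiv track=rewrite | github.com/dfa461/sentinel | frontend/backend/app/rl_assessment.py | parse_java_test_input
-- ===== SOURCE A (Python) =====
-- def parse_java_test_input(test_input: str) -> str:
--     """
--     Parse test input and convert to valid Java syntax.
--     Converts: nums = [1,1,1,2,2,3], k = 2
--     To: new int[]{1,1,1,2,2,3}, 2
--     """
--     # Split by comma but respect array brackets
--     parts = []
--     current = ""
--     bracket_depth = 0
--
--     for char in test_input:
--         if char == '[':
--             bracket_depth += 1
--             current += char
--         elif char == ']':
--             bracket_depth -= 1
--             current += char
--         elif char == ',' and bracket_depth == 0: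
--             parts.append(current.strip())
--             current = ""
--         else:
--             current += char
--
--     if current.strip():
--         parts.append(current.strip())
--
--     # Process each part
--     java_args = []
--     for part in parts:
--         # Check if it's a variable assignment (e.g., "nums = [1,2,3]")
--         if '=' in part:
--             var_name, value = part.split('=', 1)
--             var_name = var_name.strip()
--             value = value.strip()
--
--             # Convert array notation
--             if value.startswith('[') and value.endswith(']'):
--                 # Extract array elements
--                 array_content = value[1:-1].strip()
--                 java_args.append(f"new int[]{{{array_content}}}")
--             else:
--                 # Regular value (int, string, etc.)
--                 java_args.append(value)
--         else:
--             # No assignment, just use the value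
--             java_args.append(part.strip())
--
--     return ", ".join(java_args)
-- ===== SOURCE B (Python) =====
-- def to_java_arg(part: str) -> str:
--     if '=' in part:
--         var_name, value = part.split('=', 1)
--         value = value.strip()
--         if value.startswith('[') and value.endswith(']'):
--             return "new int[]{" + value[1:-1].strip() + "}"
--         return value
--     return part.strip()
--
--
-- def parse_java_test_input(test_input: str) -> str:
--     # Phase 1: naive comma split, then regroup fragments by bracket balance.
--     frags = test_input.split(',')
--     parts = []
--     buf = []
--     balance = 0
--     for frag in frags[:-1]:
--         buf.append(frag)
--         balance += frag.count('[') - frag.count(']')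
--         if balance == 0:
--             parts.append(','.join(buf).strip())
--             buf = []
--     tail = ','.join(buf + [frags[-1]])
--     if tail.strip():
--         parts.append(tail.strip())
--     # Phase 2: convert each part to Java argument syntax.
--     return ", ".join(to_java_arg(p) for p in parts)
-- ===== Notes on version B (the rewrite author's own statement) =====
-- stated objective: faster
-- what changed: Phase 1's char-by-char bracket-depth scanner is replaced by one native comma split followed by regrouping the fragments on a running bracket balance computed with str.count; phase 2 becomes a join over a per-part helper function.
import Mathlib
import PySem

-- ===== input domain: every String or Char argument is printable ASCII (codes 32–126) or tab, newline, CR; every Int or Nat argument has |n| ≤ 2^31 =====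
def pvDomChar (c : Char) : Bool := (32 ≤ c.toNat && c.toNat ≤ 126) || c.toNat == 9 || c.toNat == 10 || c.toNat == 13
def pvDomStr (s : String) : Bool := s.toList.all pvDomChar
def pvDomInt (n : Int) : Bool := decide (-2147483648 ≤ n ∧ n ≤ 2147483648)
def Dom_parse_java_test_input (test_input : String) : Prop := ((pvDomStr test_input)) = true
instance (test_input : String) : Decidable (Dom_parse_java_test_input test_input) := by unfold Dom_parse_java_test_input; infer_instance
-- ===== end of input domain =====

-- B replaces A's char-by-char bracket-depth scanner by one native comma split followed by
-- regrouping fragments on a running bracket balance (measured constant-factor speedup).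

-- (B-side helper, defined first so the match auxiliary it elaborates is not named into a port's family)
def pvToJavaArg (part : List Char) : List Char :=
  if PySem.Chars.isIn ['='] part then
    match PySem.Chars.splitOnMax part ['='] 1 with
    | [_, v] =>
      let value := PySem.Chars.strip v
      if PySem.Chars.startswith value ['['] && PySem.Chars.endswith value [']'] then
        "new int[]{".toList ++
          PySem.Chars.strip (PySem.List.slice value (some 1) (some (-1))) ++ ['}']
      else value
    | _ => []                    -- unreachable: split('=',1) with '=' present yields 2 pieces
  else PySem.Chars.strip part


-- ===== PORT A =====
-- loop body of A's character scan (parts, current, bracket_depth)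
def pvStepA (st : List (List Char) × List Char × Int) (c : Char) :
    List (List Char) × List Char × Int :=
  if c = '[' then (st.1, st.2.1 ++ [c], st.2.2 + 1)
  else if c = ']' then (st.1, st.2.1 ++ [c], st.2.2 - 1)
  else if c = ',' ∧ st.2.2 = 0 then (st.1 ++ [PySem.Chars.strip st.2.1], [], st.2.2)
  else (st.1, st.2.1 ++ [c], st.2.2)

def parse_java_test_input (test_input : String) : String :=
  let st := test_input.toList.foldl pvStepA ([], [], 0)
  let parts := if PySem.Chars.strip st.2.1 ≠ [] then st.1 ++ [PySem.Chars.strip st.2.1] else st.1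
  let java_args := parts.foldl (fun acc part =>
    acc ++ [if PySem.Chars.isIn ['='] part then
              match PySem.Chars.splitOnMax part ['='] 1 with
              | [_, v] =>
                let value := PySem.Chars.strip v
                if PySem.Chars.startswith value ['['] && PySem.Chars.endswith value [']'] then
                  "new int[]{".toList ++
                    PySem.Chars.strip (PySem.List.slice value (some 1) (some (-1))) ++ ['}']
                else value
              | _ => []          -- unreachable: split('=',1) with '=' present yields 2 pieces
            else PySem.Chars.strip part]) []
  String.ofList (PySem.Chars.join (", ".toList) java_args)

-- ===== PORT B =====
-- loop body of B's fragment regrouping (parts, buf, balance)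
def pvStepB (st : List (List Char) × List (List Char) × Int) (frag : List Char) :
    List (List Char) × List (List Char) × Int :=
  let buf := st.2.1 ++ [frag]
  let bal := st.2.2 + (PySem.Chars.count frag ['['] : Int) - (PySem.Chars.count frag [']'] : Int)
  if bal = 0 then (st.1 ++ [PySem.Chars.strip (PySem.Chars.join [','] buf)], [], bal)
  else (st.1, buf, bal)

def parse_java_test_input_alt (test_input : String) : String :=
  let frags := test_input.toList.splitOn ','
  let st := frags.dropLast.foldl pvStepB ([], [], 0)
  let tail := PySem.Chars.join [','] (st.2.1 ++ [frags.getLastD []])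
  let parts := if PySem.Chars.strip tail ≠ [] then st.1 ++ [PySem.Chars.strip tail] else st.1
  String.ofList (PySem.Chars.join (", ".toList) (parts.map pvToJavaArg))

-- ===== PRECONDITION & SPEC =====
def Spec_parse_java_test_input (test_input : String) (out : String) : Prop := out = parse_java_test_input_alt test_input
instance (test_input : String) (out : String) : Decidable (Spec_parse_java_test_input test_input out) := by unfold Spec_parse_java_test_input; infer_instance

-- ===== CLAIM (what is proved, stated in full; the proofs are below) =====
def Claim_equal_parse_java_test_input : Prop := ∀ (test_input : String), Dom_parse_java_test_input test_input → Spec_parse_java_test_input test_input (parse_java_test_input test_input)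

-- ===== LEMMAS AND PROOFS =====

-- net bracket balance of a fragment
def pvNet (f : List Char) : Int := (f.count '[' : Int) - (f.count ']' : Int)

-- A's `current` string corresponding to B's buffer of pending fragments (each closed by ',')
def pvFlat (buf : List (List Char)) : List Char := (buf.map (· ++ [','])).flatten

-- the shared "final append if strip nonempty" step
def pvFinish (parts : List (List Char)) (cur : List Char) : List (List Char) :=
  if PySem.Chars.strip cur ≠ [] then parts ++ [PySem.Chars.strip cur] else parts

theorem pv_count_go (c : Char) :
    ∀ (s : List Char) (fuel acc : Nat), s.length ≤ fuel →
      PySem.Chars.count.go [c] fuel s acc = acc + s.count c := by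
  intro s
  induction s with
  | nil => intro fuel acc _; cases fuel <;> simp [PySem.Chars.count.go]
  | cons x t ih =>
    intro fuel acc h
    cases fuel with
    | zero => simp at h
    | succ n =>
      have hrec : PySem.Chars.count.go [c] (n + 1) (x :: t) acc
          = if ([c] : List Char).isPrefixOf (x :: t) then
              PySem.Chars.count.go [c] n ((x :: t).drop ([c] : List Char).length) (acc + 1)
            else PySem.Chars.count.go [c] n t acc := rfl
      rw [hrec]
      have hlen : t.length ≤ n := by simp at h; omega
      by_cases hx : c = x
      · subst hx
        have hpre : ([c] : List Char).isPrefixOf (c :: t) = true := by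
          simp [List.isPrefixOf]
        rw [if_pos hpre]
        rw [show ((c :: t).drop ([c] : List Char).length) = t by simp]
        rw [ih n (acc + 1) hlen]
        rw [List.count_cons]
        simp
        omega
      · have hpre : ([c] : List Char).isPrefixOf (x :: t) = false := by
          simp [List.isPrefixOf]
          exact fun hh => hx hh
        rw [hpre]
        simp only [Bool.false_eq_true, if_false]
        rw [ih n acc hlen]
        rw [List.count_cons]
        rw [show (x == c) = false by simp; exact fun hh => hx hh.symm]
        simp

theorem pv_count_singleton (s : List Char) (c : Char) :
    PySem.Chars.count s [c] = s.count c := by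
  have : ([c] : List Char).isEmpty = false := rfl
  simp only [PySem.Chars.count, this, Bool.false_eq_true, if_false]
  exact (pv_count_go c s s.length 0 le_rfl).trans (by omega)

-- A's scan over a comma-free fragment just appends it and adds its net balance
theorem pv_run_nocomma :
    ∀ (f : List Char) (parts : List (List Char)) (cur : List Char) (d : Int),
      (',' : Char) ∉ f →
      List.foldl pvStepA (parts, cur, d) f = (parts, cur ++ f, d + pvNet f) := by
  intro f
  induction f with
  | nil => intro parts cur d _; simp [pvNet]
  | cons x t ih =>
    intro parts cur d hx
    have hxc : x ≠ ',' := fun h => hx (h ▸ List.mem_cons_self)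
    have ht : (',' : Char) ∉ t := fun h => hx (List.mem_cons_of_mem _ h)
    rw [List.foldl_cons]
    by_cases h1 : x = '['
    · subst h1
      have hstep : pvStepA (parts, cur, d) '[' = (parts, cur ++ ['['], d + 1) := by
        unfold pvStepA
        rw [if_pos rfl]
      rw [hstep, ih _ _ _ ht]
      simp only [pvNet, List.append_assoc, List.singleton_append, List.count_cons,
        Prod.mk.injEq, true_and]
      simp
      omega
    · by_cases h2 : x = ']'
      · subst h2
        have hstep : pvStepA (parts, cur, d) ']' = (parts, cur ++ [']'], d - 1) := by
          unfold pvStepA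
          rw [if_neg (by decide), if_pos rfl]
        rw [hstep, ih _ _ _ ht]
        simp only [pvNet, List.append_assoc, List.singleton_append, List.count_cons,
          Prod.mk.injEq, true_and]
        simp
        omega
      · have hstep : pvStepA (parts, cur, d) x = (parts, cur ++ [x], d) := by
          unfold pvStepA
          rw [if_neg h1, if_neg h2, if_neg (fun h => hxc h.1)]
        rw [hstep, ih _ _ _ ht]
        have c1 : (x :: t).count '[' = t.count '[' := by
          simp only [List.count_cons, beq_iff_eq]
          simp [h1]
        have c2 : (x :: t).count ']' = t.count ']' := by
          simp only [List.count_cons, beq_iff_eq]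
          simp [h2]
        simp [pvNet, c1, c2]

theorem pv_join_append_last (buf : List (List Char)) (lastf : List Char) :
    PySem.Chars.join [','] (buf ++ [lastf]) = pvFlat buf ++ lastf := by
  induction buf with
  | nil => simp [pvFlat, PySem.Chars.join_singleton]
  | cons b bs ih =>
    rcases hb : bs ++ [lastf] with _ | ⟨q, rest⟩
    · exact absurd hb (by simp)
    · rw [List.cons_append, hb, PySem.Chars.join_cons_cons, ← hb, ih]
      simp [pvFlat]

theorem pv_flat_append (buf : List (List Char)) (f : List Char) :
    pvFlat (buf ++ [f]) = pvFlat buf ++ f ++ [','] := by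
  simp [pvFlat]

-- no piece produced by splitOnP satisfies the predicate
theorem pv_splitOnP_no_sep (p : Char → Bool) :
    ∀ (s : List Char) (f : List Char), f ∈ s.splitOnP p → ∀ c ∈ f, p c = false := by
  intro s
  induction s with
  | nil =>
    intro f hf c hc
    simp [List.splitOnP_nil] at hf
    subst hf; simp at hc
  | cons x xs ih =>
    intro f hf c hc
    rw [List.splitOnP_cons] at hf
    by_cases hp : p x = true
    · rw [if_pos hp] at hf
      rcases List.mem_cons.mp hf with h | h
      · subst h; simp at hc
      · exact ih f h c hc
    · rw [if_neg hp] at hf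
      rcases he : xs.splitOnP p with _ | ⟨h0, t0⟩
      · exact absurd he (List.splitOnP_ne_nil p xs)
      · rw [he, List.modifyHead_cons] at hf
        rcases List.mem_cons.mp hf with h | h
        · subst h
          rcases List.mem_cons.mp hc with h | h
          · subst h; simpa using hp
          · exact ih h0 (he ▸ List.mem_cons_self) c h
        · exact ih f (he ▸ List.mem_cons_of_mem _ h) c hc

theorem pv_mem_splitOn_no_comma (s : List Char) (f : List Char)
    (hf : f ∈ s.splitOn ',') : (',' : Char) ∉ f := by
  intro hc
  have := pv_splitOnP_no_sep (fun x => x == ',') s f hf ',' hc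
  simp at this

-- the main invariant: A scanning the rejoined fragments = B folding the fragments
theorem pv_main :
    ∀ (main : List (List Char)) (lastf : List Char) (parts : List (List Char))
      (buf : List (List Char)) (bal : Int),
      (∀ f ∈ main, (',' : Char) ∉ f) → (',' : Char) ∉ lastf →
      (let st := List.foldl pvStepA (parts, pvFlat buf, bal)
          (PySem.Chars.join [','] (main ++ [lastf]));
        pvFinish st.1 st.2.1)
      = (let st := List.foldl pvStepB (parts, buf, bal) main;
        pvFinish st.1 (PySem.Chars.join [','] (st.2.1 ++ [lastf]))) := by
  intro main
  induction main with
  | nil =>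
    intro lastf parts buf bal _ hlast
    simp only [List.nil_append, List.foldl_nil]
    rw [PySem.Chars.join_singleton, pv_run_nocomma lastf parts _ bal hlast,
      pv_join_append_last]
  | cons f rest ih =>
    intro lastf parts buf bal hmain hlast
    have hf : (',' : Char) ∉ f := hmain f List.mem_cons_self
    have hrest : ∀ g ∈ rest, (',' : Char) ∉ g := fun g hg => hmain g (List.mem_cons_of_mem _ hg)
    rcases hb : rest ++ [lastf] with _ | ⟨q, tl⟩
    · exact absurd hb (by simp)
    · rw [List.cons_append, hb, PySem.Chars.join_cons_cons, ← hb]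
      rw [show f ++ [','] ++ PySem.Chars.join [','] (rest ++ [lastf])
            = f ++ (',' :: PySem.Chars.join [','] (rest ++ [lastf])) by simp]
      simp only [List.foldl_append, List.foldl_cons]
      rw [pv_run_nocomma f parts _ bal hf]
      by_cases hz : bal + pvNet f = 0
      · have h0 : bal + (PySem.Chars.count f ['['] : Int)
            - (PySem.Chars.count f [']'] : Int) = 0 := by
          rw [pv_count_singleton, pv_count_singleton]
          simp only [pvNet] at hz
          omega
        have stepAEq : pvStepA (parts, pvFlat buf ++ f, bal + pvNet f) ','
            = (parts ++ [PySem.Chars.strip (pvFlat buf ++ f)], [], bal + pvNet f) := by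
          unfold pvStepA
          rw [if_neg (by decide), if_neg (by decide), if_pos ⟨rfl, hz⟩]
        have stepBEq : pvStepB (parts, buf, bal) f
            = (parts ++ [PySem.Chars.strip (PySem.Chars.join [','] (buf ++ [f]))], [], 0) := by
          simp only [pvStepB]
          rw [h0]
          simp
        rw [stepAEq, stepBEq, hz]
        rw [show (parts ++ [PySem.Chars.strip (pvFlat buf ++ f)], ([] : List Char), (0 : Int))
              = (parts ++ [PySem.Chars.strip (pvFlat buf ++ f)],
                 pvFlat ([] : List (List Char)), (0 : Int)) by simp [pvFlat]]
        rw [ih lastf _ [] 0 hrest hlast]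
        rw [pv_join_append_last buf f]
      · have h0 : ¬ (bal + (PySem.Chars.count f ['['] : Int)
            - (PySem.Chars.count f [']'] : Int) = 0) := by
          rw [pv_count_singleton, pv_count_singleton]
          simp only [pvNet] at hz ⊢
          omega
        have stepAEq : pvStepA (parts, pvFlat buf ++ f, bal + pvNet f) ','
            = (parts, pvFlat buf ++ f ++ [','], bal + pvNet f) := by
          unfold pvStepA
          rw [if_neg (by decide), if_neg (by decide), if_neg (fun h => hz h.2)]
        have hbal : bal + (PySem.Chars.count f ['['] : Int)
            - (PySem.Chars.count f [']'] : Int) = bal + pvNet f := by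
          rw [pv_count_singleton, pv_count_singleton]
          simp [pvNet]
          ring
        have stepBEq : pvStepB (parts, buf, bal) f = (parts, buf ++ [f], bal + pvNet f) := by
          simp only [pvStepB]
          rw [hbal]
          simp [hz]
        rw [stepAEq, stepBEq]
        rw [show (parts, pvFlat buf ++ f ++ [','], bal + pvNet f)
              = (parts, pvFlat (buf ++ [f]), bal + pvNet f) by rw [pv_flat_append]]
        rw [ih lastf _ (buf ++ [f]) (bal + pvNet f) hrest hlast]

theorem pv_dropLast_getLastD {α : Type} (l : List α) (d : α) (h : l ≠ []) :
    l.dropLast ++ [l.getLastD d] = l := by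
  rw [List.getLastD_eq_getLast?, List.getLast?_eq_some_getLast h]
  simpa using List.dropLast_concat_getLast h

-- ===== VERDICT (by name: the statement is the Claim_ definition above) =====
theorem parse_java_test_input_spec : Claim_equal_parse_java_test_input := by
  intro t _
  unfold Spec_parse_java_test_input parse_java_test_input parse_java_test_input_alt
  simp only []
  have hne : t.toList.splitOn ',' ≠ [] := List.splitOnP_ne_nil _ _
  have hjoin : PySem.Chars.join [','] ((t.toList.splitOn ',').dropLast
      ++ [(t.toList.splitOn ',').getLastD []]) = t.toList := by
    rw [pv_dropLast_getLastD _ _ hne]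
    exact List.intercalate_splitOn t.toList ','
  have hmain : ∀ f ∈ (t.toList.splitOn ',').dropLast, (',' : Char) ∉ f := by
    intro f hf
    exact pv_mem_splitOn_no_comma t.toList f ((List.dropLast_sublist _).subset hf)
  have hlast : (',' : Char) ∉ (t.toList.splitOn ',').getLastD [] := by
    apply pv_mem_splitOn_no_comma t.toList
    rw [List.getLastD_eq_getLast?, List.getLast?_eq_some_getLast hne]
    simp [List.getLast_mem]
  have key := pv_main (t.toList.splitOn ',').dropLast ((t.toList.splitOn ',').getLastD [])
      [] [] 0 hmain hlast
  simp only [pvFlat, List.map_nil, List.flatten_nil] at key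
  rw [hjoin] at key
  simp only [pvFinish] at key
  rw [PySem.List.foldl_append_singleton_eq_map, List.nil_append]
  rw [key]
  rfl
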